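-- pv_equiv track=rewrite | github.com/furkanBilici/Crypto_Encryption_Project | backend/app/algorithms/route.py | route_cipher
-- ===== SOURCE A (Python) =====
-- import math
--
-- def route_cipher(text, n, clockwise=True):
--     rows = math.ceil(len(text) / n)
--     matrix = [['' for _ in range(n)] for _ in range(rows)]
--     idx = 0
--     for i in range(rows):
--         for j in range(n):
--             matrix[i][j] = text[idx] if idx < len(text) else 'X'
--             idx += 1
--     res = []
--     left, right, top, bottom = 0, n - 1, 0, rows - 1
--     while left <= right and top <= bottom:
--         if clockwise:
--             for i in range(left, right + 1):
--                 res.append(matrix[top][i])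
--             top += 1
--             for i in range(top, bottom + 1):
--                 res.append(matrix[i][right])
--             right -= 1
--             for i in range(right, left - 1, -1):
--                 res.append(matrix[bottom][i])
--             bottom -= 1
--             for i in range(bottom, top - 1, -1):
--                 res.append(matrix[i][left])
--             left += 1
--         else:
--             for i in range(top, bottom + 1):
--                 res.append(matrix[i][left])
--             left += 1
--             for i in range(left, right + 1):
--                 res.append(matrix[bottom][i])
--             bottom -= 1
--             for i in range(bottom, top - 1, -1):
--                 res.append(matrix[i][right])
--             right -= 1
--             for i in range(right, left - 1, -1):
--                 res.append(matrix[top][i])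
--             top += 1
--     return "".join(res)
-- ===== SOURCE B (Python) =====
-- import math
--
-- def route_cipher(text, n, clockwise=True):
--     # Turtle walk: a single (r, c) pointer with a direction cycle and two
--     # decrementing run-length counters over a flat padded string, instead of
--     # A's 2D matrix with four mutated boundary variables and eight range loops.
--     rows = math.ceil(len(text) / n)
--     pad = text + 'X' * (rows * n - len(text))
--     if clockwise:
--         dirs = [(0, 1), (1, 0), (0, -1), (-1, 0)]
--         r, c = 0, -1
--         a, b = n, rows - 1
--     else:
--         dirs = [(1, 0), (0, 1), (-1, 0), (0, -1)]
--         r, c = -1, 0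
--         a, b = rows, n - 1
--     out = []
--     d = 0
--     while a >= 1 and b >= 0:
--         for length in (a, b, a - 1, b - 1):
--             dr, dc = dirs[d]
--             for _ in range(length):
--                 r += dr
--                 c += dc
--                 out.append(pad[r * n + c])
--             d = (d + 1) % 4
--         a -= 2
--         b -= 2
--     return "".join(out)
-- ===== Notes on version B (the rewrite author's own statement) =====
-- stated objective: alternative
-- what changed: B replaces A's 2D matrix, four mutated boundary variables and eight explicit range loops by a turtle walk: one (r,c) pointer over a flat padded string, a cycling direction vector list and two decrementing run-length counters (a,b -> a,b,a-1,b-1 per lap), one generic inner move loop.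
import Mathlib
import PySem

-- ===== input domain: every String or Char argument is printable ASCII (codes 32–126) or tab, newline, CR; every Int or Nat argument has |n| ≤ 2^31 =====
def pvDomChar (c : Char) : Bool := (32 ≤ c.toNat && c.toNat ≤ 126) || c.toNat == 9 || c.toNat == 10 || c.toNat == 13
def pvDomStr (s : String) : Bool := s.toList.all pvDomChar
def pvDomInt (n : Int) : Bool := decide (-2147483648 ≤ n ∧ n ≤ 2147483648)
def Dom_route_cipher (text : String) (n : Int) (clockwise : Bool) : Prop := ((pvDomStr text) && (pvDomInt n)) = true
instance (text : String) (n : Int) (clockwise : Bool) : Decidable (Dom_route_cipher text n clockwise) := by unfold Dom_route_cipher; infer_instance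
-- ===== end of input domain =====

-- B replaces A's 2D matrix, four mutated boundary variables and eight explicit range loops
-- by a turtle walk: one (r, c) pointer over a flat padded string, a cycling direction-vector
-- list and two decrementing run-length counters (objective: alternative decomposition).

-- ===== PORT A =====

-- math.ceil(len / n) : exact ceiling division -((-len) // n) (A's float division is exact at these sizes)
def pvCeil (len n : Int) : Int := -(PySem.Int.floordiv (-len) n)

-- matrix[i][j] = text[idx] if idx < len(text) else 'X'; the fill counter idx equals i*n + j
-- at cell (i, j) (it is incremented once per cell, row-major).  text[idx] is in range there, exact.
def pvMatrixA (tl : List Char) (rows n : Int) : List (List Char) :=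
  (PySem.List.pyRange 0 rows 1).map (fun i =>
    (PySem.List.pyRange 0 n 1).map (fun j =>
      if i * n + j < PySem.List.len tl then PySem.List.pyGetD tl (i * n + j) 'X' else 'X'))

-- matrix[i][j]; every access of the spiral walk is in range, so the defaults are never used (exact)
def pvMGet (mat : List (List Char)) (i j : Int) : Char :=
  PySem.List.pyGetD (PySem.List.pyGetD mat i []) j 'X'

-- A's while loop; the shadowing lets mirror A's in-place updates of top/right/bottom/left
def pvSpiralA (mat : List (List Char)) (cw : Bool) (left right top bottom : Int) : List Char :=
  if h : left ≤ right ∧ top ≤ bottom then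
    if cw then
      let s1 := (PySem.List.pyRange left (right + 1) 1).map (fun i => pvMGet mat top i)
      let top := top + 1
      let s2 := (PySem.List.pyRange top (bottom + 1) 1).map (fun i => pvMGet mat i right)
      let right := right - 1
      let s3 := (PySem.List.pyRange right (left - 1) (-1)).map (fun i => pvMGet mat bottom i)
      let bottom := bottom - 1
      let s4 := (PySem.List.pyRange bottom (top - 1) (-1)).map (fun i => pvMGet mat i left)
      let left := left + 1
      s1 ++ (s2 ++ (s3 ++ (s4 ++ pvSpiralA mat cw left right top bottom)))
    else
      let s1 := (PySem.List.pyRange top (bottom + 1) 1).map (fun i => pvMGet mat i left)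
      let left := left + 1
      let s2 := (PySem.List.pyRange left (right + 1) 1).map (fun i => pvMGet mat bottom i)
      let bottom := bottom - 1
      let s3 := (PySem.List.pyRange bottom (top - 1) (-1)).map (fun i => pvMGet mat i right)
      let right := right - 1
      let s4 := (PySem.List.pyRange right (left - 1) (-1)).map (fun i => pvMGet mat top i)
      let top := top + 1
      s1 ++ (s2 ++ (s3 ++ (s4 ++ pvSpiralA mat cw left right top bottom)))
  else []
termination_by (right - left + 1).toNat
decreasing_by all_goals omega

def route_cipher (text : String) (n : Int) (clockwise : Bool) : String :=
  let tl := text.toList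
  let rows := pvCeil (PySem.List.len tl) n
  let matrix := pvMatrixA tl rows n
  String.ofList (pvSpiralA matrix clockwise 0 (n - 1) 0 (rows - 1))

-- ===== PORT B =====

-- math.ceil(len / n) in B, same exact ceiling division (B's own copy)
def pvCeilB (len n : Int) : Int := -(PySem.Int.floordiv (-len) n)

-- text + 'X' * (rows * n - len(text))
def pvPad (tl : List Char) (rows n : Int) : List Char :=
  tl ++ List.replicate (rows * n - PySem.List.len tl).toNat 'X'

-- one iteration of 'for length in (a, b, a-1, b-1)': look up dirs[d] (always in range,
-- so the default is never used — exact), run the inner move loop, advance d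
def pvSegStep (pad : List Char) (n : Int) (dirs : List (Int × Int))
    (st : Int × Int × Int × List Char) (len : Int) : Int × Int × Int × List Char :=
  let dir := PySem.List.pyGetD dirs st.2.2.1 (0, 0)
  let inner := (PySem.List.pyRange 0 len 1).foldl
    (fun s _ => (s.1 + dir.1, s.2.1 + dir.2,
      s.2.2 ++ [PySem.List.pyGetD pad ((s.1 + dir.1) * n + (s.2.1 + dir.2)) 'X']))
    (st.1, st.2.1, st.2.2.2)
  (inner.1, inner.2.1, PySem.Int.mod (st.2.2.1 + 1) 4, inner.2.2)

-- B's outer while loop over the run lengths (a, b) with state (r, c, d, out)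
def pvTurtle (pad : List Char) (n : Int) (dirs : List (Int × Int))
    (r c d : Int) (out : List Char) (a b : Int) : List Char :=
  if h : 1 ≤ a ∧ 0 ≤ b then
    let st := [a, b, a - 1, b - 1].foldl (pvSegStep pad n dirs) (r, c, d, out)
    pvTurtle pad n dirs st.1 st.2.1 st.2.2.1 st.2.2.2 (a - 2) (b - 2)
  else out
termination_by a.toNat
decreasing_by omega

def route_cipher_alt (text : String) (n : Int) (clockwise : Bool) : String :=
  let tl := text.toList
  let rows := pvCeilB (PySem.List.len tl) n
  let pad := pvPad tl rows n
  if clockwise then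
    String.ofList (pvTurtle pad n [(0, 1), (1, 0), (0, -1), (-1, 0)] 0 (-1) 0 [] n (rows - 1))
  else
    String.ofList (pvTurtle pad n [(1, 0), (0, 1), (-1, 0), (0, -1)] (-1) 0 0 [] rows (n - 1))

-- ===== PRECONDITION & SPEC =====
-- n = 0 makes A raise ZeroDivisionError in math.ceil(len(text) / n); everything else returns.
def Pre_route_cipher (text : String) (n : Int) (clockwise : Bool) : Prop := n ≠ 0
instance (text : String) (n : Int) (clockwise : Bool) : Decidable (Pre_route_cipher text n clockwise) := by unfold Pre_route_cipher; infer_instance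
def pvWitness_route_cipher : String × Int × Bool := ("HELLO", 2, true)

def Spec_route_cipher (text : String) (n : Int) (clockwise : Bool) (out : String) : Prop := out = route_cipher_alt text n clockwise
instance (text : String) (n : Int) (clockwise : Bool) (out : String) : Decidable (Spec_route_cipher text n clockwise out) := by unfold Spec_route_cipher; infer_instance

-- ===== CLAIM (what is proved, stated in full; the proofs are below) =====
def Claim_equal_route_cipher : Prop := ∀ (text : String) (n : Int) (clockwise : Bool), Dom_route_cipher text n clockwise → Pre_route_cipher text n clockwise → Spec_route_cipher text n clockwise (route_cipher text n clockwise)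

-- ===== LEMMAS AND PROOFS =====

-- the two cell views agree on every in-range cell
theorem pv_cell_agree (tl : List Char) (rows n i j : Int)
    (hlen : (tl.length : Int) ≤ rows * n)
    (hi0 : 0 ≤ i) (hi : i < rows) (hj0 : 0 ≤ j) (hj : j < n) :
    pvMGet (pvMatrixA tl rows n) i j = PySem.List.pyGetD (pvPad tl rows n) (i * n + j) 'X' := by
  have hnn : 0 ≤ (rows - 1 - i) * n := mul_nonneg (by omega) (by omega)
  have hsum : i * n + j + ((rows - 1 - i) * n) + (n - j) = rows * n := by ring
  have ht0 : 0 ≤ i * n + j := by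
    have := mul_nonneg hi0 (by omega : (0:Int) ≤ n); omega
  have ht : i * n + j < rows * n := by omega
  unfold pvMGet pvMatrixA pvPad
  rw [PySem.List.pyGetD_map_pyRange_of_nonneg _ _ _ _ hi0 hi,
      PySem.List.pyGetD_map_pyRange_of_nonneg _ _ _ _ hj0 hj]
  have hflen : ((tl ++ List.replicate (rows * n - PySem.List.len tl).toNat 'X').length : Int)
      = rows * n := by
    simp [PySem.List.len_eq]; omega
  rw [PySem.List.pyGetD_eq_getElem (tl ++ List.replicate (rows * n - PySem.List.len tl).toNat 'X') 'X' ht0 (by rw [hflen]; exact ht)]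
  by_cases hc : i * n + j < PySem.List.len tl
  · rw [if_pos hc]
    have hc' : (i * n + j).toNat < tl.length := by
      simp [PySem.List.len_eq] at hc; omega
    rw [PySem.List.pyGetD_eq_getElem tl 'X' ht0 (by simpa [PySem.List.len_eq] using hc),
        List.getElem_append_left hc']
  · rw [if_neg hc]
    have hc' : ¬ (i * n + j).toNat < tl.length := by
      simp [PySem.List.len_eq] at hc; omega
    rw [List.getElem_append_right (by omega)]
    simp

-- the inner move loop in closed form
theorem pv_run_eq (pad : List Char) (n dr dc : Int) :
    ∀ (m : Nat) (r c : Int) (out : List Char),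
    (List.range m).foldl
      (fun s (_ : Nat) => (s.1 + dr, s.2.1 + dc,
        s.2.2 ++ [PySem.List.pyGetD pad ((s.1 + dr) * n + (s.2.1 + dc)) 'X']))
      (r, c, out)
    = (r + dr * m, c + dc * m,
       out ++ (List.range m).map (fun (t : Nat) =>
         PySem.List.pyGetD pad ((r + dr * ((t : Int) + 1)) * n + (c + dc * ((t : Int) + 1))) 'X')) := by
  intro m
  induction m with
  | zero => intro r c out; simp
  | succ m ih =>
    intro r c out
    rw [List.range_succ, List.foldl_append, ih]
    simp only [List.foldl_cons, List.foldl_nil, List.map_append, List.map_cons, List.map_nil,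
      List.append_assoc, Prod.mk.injEq]
    refine ⟨by push_cast; ring, by push_cast; ring, ?_⟩
    have e1 : r + dr * (m : Int) + dr = r + dr * ((m : Int) + 1) := by ring
    have e2 : c + dc * (m : Int) + dc = c + dc * ((m : Int) + 1) := by ring
    rw [e1, e2]

-- one segment of the turtle in closed form
theorem pv_segStep_eq (pad : List Char) (n : Int) (dirs : List (Int × Int))
    (r c d len dr dc : Int) (out : List Char)
    (hd : PySem.List.pyGetD dirs d (0, 0) = (dr, dc)) :
    pvSegStep pad n dirs (r, c, d, out) len
    = (r + dr * (len.toNat : Int), c + dc * (len.toNat : Int), PySem.Int.mod (d + 1) 4,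
       out ++ (List.range len.toNat).map (fun (t : Nat) =>
         PySem.List.pyGetD pad ((r + dr * ((t : Int) + 1)) * n + (c + dc * ((t : Int) + 1))) 'X')) := by
  unfold pvSegStep
  simp only [hd, PySem.List.pyRange_one, sub_zero, List.foldl_map]
  rw [pv_run_eq]

-- clockwise: the turtle starting ring k reproduces A's spiral from ring k's boundaries
theorem pv_turtle_cw (tl : List Char) (rows n : Int)
    (hlen : (tl.length : Int) ≤ rows * n) :
    ∀ (fuel : Nat) (k : Int) (out : List Char), 0 ≤ k → (n - 2 * k).toNat ≤ fuel →
    pvTurtle (pvPad tl rows n) n [(0, 1), (1, 0), (0, -1), (-1, 0)] k (k - 1) 0 out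
      (n - 2 * k) (rows - 1 - 2 * k)
    = out ++ pvSpiralA (pvMatrixA tl rows n) true k (n - 1 - k) k (rows - 1 - k) := by
  intro fuel
  induction fuel with
  | zero =>
    intro k out hk hf
    rw [pvTurtle, dif_neg (by omega), pvSpiralA, dif_neg (by omega)]
    simp
  | succ fuel ih =>
    intro k out hk hf
    by_cases h : 1 ≤ n - 2 * k ∧ 0 ≤ rows - 1 - 2 * k
    · rw [pvTurtle, dif_pos h]
      simp only [List.foldl_cons, List.foldl_nil]
      rw [pv_segStep_eq _ _ _ k (k - 1) 0 (n - 2 * k) 0 1 out (by decide)]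
      rw [show PySem.Int.mod ((0 : Int) + 1) 4 = 1 from by decide]
      rw [pv_segStep_eq _ _ _ _ _ 1 (rows - 1 - 2 * k) 1 0 _ (by decide)]
      rw [show PySem.Int.mod ((1 : Int) + 1) 4 = 2 from by decide]
      rw [pv_segStep_eq _ _ _ _ _ 2 (n - 2 * k - 1) 0 (-1) _ (by decide)]
      rw [show PySem.Int.mod ((2 : Int) + 1) 4 = 3 from by decide]
      rw [pv_segStep_eq _ _ _ _ _ 3 (rows - 1 - 2 * k - 1) (-1) 0 _ (by decide)]
      rw [show PySem.Int.mod ((3 : Int) + 1) 4 = 0 from by decide]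
      dsimp only
      rw [Int.toNat_of_nonneg (show (0:Int) ≤ n - 2 * k by omega),
          Int.toNat_of_nonneg (show (0:Int) ≤ rows - 1 - 2 * k by omega),
          Int.toNat_of_nonneg (show (0:Int) ≤ n - 2 * k - 1 by omega)]
      have hseg1 :
          List.map (fun (t : Nat) => PySem.List.pyGetD (pvPad tl rows n)
              ((k + 0 * ((t:Int) + 1)) * n + (k - 1 + 1 * ((t:Int) + 1))) 'X')
            (List.range (n - 2 * k).toNat)
          = (PySem.List.pyRange k (n - 1 - k + 1) 1).map (fun i => pvMGet (pvMatrixA tl rows n) k i) := by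
        rw [PySem.List.pyRange_one, List.map_map, show n - 1 - k + 1 - k = n - 2 * k from by ring]
        refine List.map_congr_left (fun t ht => ?_)
        have ht' : (t : Int) < n - 2 * k := by have := List.mem_range.mp ht; omega
        simp only [Function.comp_apply]
        rw [pv_cell_agree tl rows n k (k + (t:Int)) hlen (by omega) (by omega) (by omega) (by omega)]
        exact congrArg (fun z => PySem.List.pyGetD (pvPad tl rows n) z 'X') (by ring)
      have hseg2 :
          List.map (fun (t : Nat) => PySem.List.pyGetD (pvPad tl rows n)
              ((k + 0 * (n - 2 * k) + 1 * ((t:Int) + 1)) * n + (k - 1 + 1 * (n - 2 * k) + 0 * ((t:Int) + 1))) 'X')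
            (List.range (rows - 1 - 2 * k).toNat)
          = (PySem.List.pyRange (k + 1) (rows - 1 - k + 1) 1).map (fun i => pvMGet (pvMatrixA tl rows n) i (n - 1 - k)) := by
        rw [PySem.List.pyRange_one, List.map_map, show rows - 1 - k + 1 - (k + 1) = rows - 1 - 2 * k from by ring]
        refine List.map_congr_left (fun t ht => ?_)
        have ht' : (t : Int) < rows - 1 - 2 * k := by have := List.mem_range.mp ht; omega
        simp only [Function.comp_apply]
        rw [pv_cell_agree tl rows n (k + 1 + (t:Int)) (n - 1 - k) hlen (by omega) (by omega) (by omega) (by omega)]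
        exact congrArg (fun z => PySem.List.pyGetD (pvPad tl rows n) z 'X') (by ring)
      have hseg3 :
          List.map (fun (t : Nat) => PySem.List.pyGetD (pvPad tl rows n)
              ((k + 0 * (n - 2 * k) + 1 * (rows - 1 - 2 * k) + 0 * ((t:Int) + 1)) * n +
                (k - 1 + 1 * (n - 2 * k) + 0 * (rows - 1 - 2 * k) + -1 * ((t:Int) + 1))) 'X')
            (List.range (n - 2 * k - 1).toNat)
          = (PySem.List.pyRange (n - 1 - k - 1) (k - 1) (-1)).map (fun i => pvMGet (pvMatrixA tl rows n) (rows - 1 - k) i) := by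
        rw [PySem.List.pyRange_neg_one, List.map_map, show n - 1 - k - 1 - (k - 1) = n - 2 * k - 1 from by ring]
        refine List.map_congr_left (fun t ht => ?_)
        have ht' : (t : Int) < n - 2 * k - 1 := by have := List.mem_range.mp ht; omega
        simp only [Function.comp_apply]
        rw [pv_cell_agree tl rows n (rows - 1 - k) (n - 1 - k - 1 - (t:Int)) hlen (by omega) (by omega) (by omega) (by omega)]
        exact congrArg (fun z => PySem.List.pyGetD (pvPad tl rows n) z 'X') (by ring)
      have hseg4 :
          List.map (fun (t : Nat) => PySem.List.pyGetD (pvPad tl rows n)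
              ((k + 0 * (n - 2 * k) + 1 * (rows - 1 - 2 * k) + 0 * (n - 2 * k - 1) + -1 * ((t:Int) + 1)) * n +
                (k - 1 + 1 * (n - 2 * k) + 0 * (rows - 1 - 2 * k) + -1 * (n - 2 * k - 1) + 0 * ((t:Int) + 1))) 'X')
            (List.range (rows - 1 - 2 * k - 1).toNat)
          = (PySem.List.pyRange (rows - 1 - k - 1) (k + 1 - 1) (-1)).map (fun i => pvMGet (pvMatrixA tl rows n) i k) := by
        rw [PySem.List.pyRange_neg_one, List.map_map, show rows - 1 - k - 1 - (k + 1 - 1) = rows - 1 - 2 * k - 1 from by ring]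
        refine List.map_congr_left (fun t ht => ?_)
        have ht' : (t : Int) < rows - 1 - 2 * k - 1 := by have := List.mem_range.mp ht; omega
        simp only [Function.comp_apply]
        rw [pv_cell_agree tl rows n (rows - 1 - k - 1 - (t:Int)) k hlen (by omega) (by omega) (by omega) (by omega)]
        exact congrArg (fun z => PySem.List.pyGetD (pvPad tl rows n) z 'X') (by ring)
      rw [pvSpiralA, dif_pos (show k ≤ n - 1 - k ∧ k ≤ rows - 1 - k by omega),
          if_pos (show (true : Bool) = true from rfl)]
      dsimp only
      rw [hseg1, hseg2, hseg3, hseg4]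
      by_cases h2 : 1 ≤ n - 2 * k - 2 ∧ 0 ≤ rows - 1 - 2 * k - 2
      · rw [Int.toNat_of_nonneg (show (0:Int) ≤ rows - 1 - 2 * k - 1 by omega)]
        rw [show k + 0 * (n - 2 * k) + 1 * (rows - 1 - 2 * k) + 0 * (n - 2 * k - 1) + -1 * (rows - 1 - 2 * k - 1) = k + 1 from by ring,
            show k - 1 + 1 * (n - 2 * k) + 0 * (rows - 1 - 2 * k) + -1 * (n - 2 * k - 1) + 0 * (rows - 1 - 2 * k - 1) = k + 1 - 1 from by ring,
            show n - 2 * k - 2 = n - 2 * (k + 1) from by ring,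
            show rows - 1 - 2 * k - 2 = rows - 1 - 2 * (k + 1) from by ring,
            ih (k + 1) _ (by omega) (by omega),
            show n - 1 - (k + 1) = n - 1 - k - 1 from by ring,
            show rows - 1 - (k + 1) = rows - 1 - k - 1 from by ring]
        simp [List.append_assoc]
      · rw [pvTurtle, dif_neg (by omega)]
        rw [show pvSpiralA (pvMatrixA tl rows n) true (k + 1) (n - 1 - k - 1) (k + 1) (rows - 1 - k - 1) = [] from by
              rw [pvSpiralA, dif_neg (by omega)]]
        simp [List.append_assoc]
    · rw [pvTurtle, dif_neg (by omega), pvSpiralA, dif_neg (by omega)]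
      simp

-- counterclockwise: same with the roles of rows and columns exchanged
theorem pv_turtle_ccw (tl : List Char) (rows n : Int)
    (hlen : (tl.length : Int) ≤ rows * n) :
    ∀ (fuel : Nat) (k : Int) (out : List Char), 0 ≤ k → (rows - 2 * k).toNat ≤ fuel →
    pvTurtle (pvPad tl rows n) n [(1, 0), (0, 1), (-1, 0), (0, -1)] (k - 1) k 0 out
      (rows - 2 * k) (n - 1 - 2 * k)
    = out ++ pvSpiralA (pvMatrixA tl rows n) false k (n - 1 - k) k (rows - 1 - k) := by
  intro fuel
  induction fuel with
  | zero =>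
    intro k out hk hf
    rw [pvTurtle, dif_neg (by omega), pvSpiralA, dif_neg (by omega)]
    simp
  | succ fuel ih =>
    intro k out hk hf
    by_cases h : 1 ≤ rows - 2 * k ∧ 0 ≤ n - 1 - 2 * k
    · rw [pvTurtle, dif_pos h]
      simp only [List.foldl_cons, List.foldl_nil]
      rw [pv_segStep_eq _ _ _ (k - 1) k 0 (rows - 2 * k) 1 0 out (by decide)]
      rw [show PySem.Int.mod ((0 : Int) + 1) 4 = 1 from by decide]
      rw [pv_segStep_eq _ _ _ _ _ 1 (n - 1 - 2 * k) 0 1 _ (by decide)]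
      rw [show PySem.Int.mod ((1 : Int) + 1) 4 = 2 from by decide]
      rw [pv_segStep_eq _ _ _ _ _ 2 (rows - 2 * k - 1) (-1) 0 _ (by decide)]
      rw [show PySem.Int.mod ((2 : Int) + 1) 4 = 3 from by decide]
      rw [pv_segStep_eq _ _ _ _ _ 3 (n - 1 - 2 * k - 1) 0 (-1) _ (by decide)]
      rw [show PySem.Int.mod ((3 : Int) + 1) 4 = 0 from by decide]
      dsimp only
      rw [Int.toNat_of_nonneg (show (0:Int) ≤ rows - 2 * k by omega),
          Int.toNat_of_nonneg (show (0:Int) ≤ n - 1 - 2 * k by omega),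
          Int.toNat_of_nonneg (show (0:Int) ≤ rows - 2 * k - 1 by omega)]
      have hseg1 :
          List.map (fun (t : Nat) => PySem.List.pyGetD (pvPad tl rows n)
              ((k - 1 + 1 * ((t:Int) + 1)) * n + (k + 0 * ((t:Int) + 1))) 'X')
            (List.range (rows - 2 * k).toNat)
          = (PySem.List.pyRange k (rows - 1 - k + 1) 1).map (fun i => pvMGet (pvMatrixA tl rows n) i k) := by
        rw [PySem.List.pyRange_one, List.map_map, show rows - 1 - k + 1 - k = rows - 2 * k from by ring]
        refine List.map_congr_left (fun t ht => ?_)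
        have ht' : (t : Int) < rows - 2 * k := by have := List.mem_range.mp ht; omega
        simp only [Function.comp_apply]
        rw [pv_cell_agree tl rows n (k + (t:Int)) k hlen (by omega) (by omega) (by omega) (by omega)]
        exact congrArg (fun z => PySem.List.pyGetD (pvPad tl rows n) z 'X') (by ring)
      have hseg2 :
          List.map (fun (t : Nat) => PySem.List.pyGetD (pvPad tl rows n)
              ((k - 1 + 1 * (rows - 2 * k) + 0 * ((t:Int) + 1)) * n + (k + 0 * (rows - 2 * k) + 1 * ((t:Int) + 1))) 'X')
            (List.range (n - 1 - 2 * k).toNat)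
          = (PySem.List.pyRange (k + 1) (n - 1 - k + 1) 1).map (fun i => pvMGet (pvMatrixA tl rows n) (rows - 1 - k) i) := by
        rw [PySem.List.pyRange_one, List.map_map, show n - 1 - k + 1 - (k + 1) = n - 1 - 2 * k from by ring]
        refine List.map_congr_left (fun t ht => ?_)
        have ht' : (t : Int) < n - 1 - 2 * k := by have := List.mem_range.mp ht; omega
        simp only [Function.comp_apply]
        rw [pv_cell_agree tl rows n (rows - 1 - k) (k + 1 + (t:Int)) hlen (by omega) (by omega) (by omega) (by omega)]
        exact congrArg (fun z => PySem.List.pyGetD (pvPad tl rows n) z 'X') (by ring)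
      have hseg3 :
          List.map (fun (t : Nat) => PySem.List.pyGetD (pvPad tl rows n)
              ((k - 1 + 1 * (rows - 2 * k) + 0 * (n - 1 - 2 * k) + -1 * ((t:Int) + 1)) * n +
                (k + 0 * (rows - 2 * k) + 1 * (n - 1 - 2 * k) + 0 * ((t:Int) + 1))) 'X')
            (List.range (rows - 2 * k - 1).toNat)
          = (PySem.List.pyRange (rows - 1 - k - 1) (k - 1) (-1)).map (fun i => pvMGet (pvMatrixA tl rows n) i (n - 1 - k)) := by
        rw [PySem.List.pyRange_neg_one, List.map_map, show rows - 1 - k - 1 - (k - 1) = rows - 2 * k - 1 from by ring]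
        refine List.map_congr_left (fun t ht => ?_)
        have ht' : (t : Int) < rows - 2 * k - 1 := by have := List.mem_range.mp ht; omega
        simp only [Function.comp_apply]
        rw [pv_cell_agree tl rows n (rows - 1 - k - 1 - (t:Int)) (n - 1 - k) hlen (by omega) (by omega) (by omega) (by omega)]
        exact congrArg (fun z => PySem.List.pyGetD (pvPad tl rows n) z 'X') (by ring)
      have hseg4 :
          List.map (fun (t : Nat) => PySem.List.pyGetD (pvPad tl rows n)
              ((k - 1 + 1 * (rows - 2 * k) + 0 * (n - 1 - 2 * k) + -1 * (rows - 2 * k - 1) + 0 * ((t:Int) + 1)) * n +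
                (k + 0 * (rows - 2 * k) + 1 * (n - 1 - 2 * k) + 0 * (rows - 2 * k - 1) + -1 * ((t:Int) + 1))) 'X')
            (List.range (n - 1 - 2 * k - 1).toNat)
          = (PySem.List.pyRange (n - 1 - k - 1) (k + 1 - 1) (-1)).map (fun i => pvMGet (pvMatrixA tl rows n) k i) := by
        rw [PySem.List.pyRange_neg_one, List.map_map, show n - 1 - k - 1 - (k + 1 - 1) = n - 1 - 2 * k - 1 from by ring]
        refine List.map_congr_left (fun t ht => ?_)
        have ht' : (t : Int) < n - 1 - 2 * k - 1 := by have := List.mem_range.mp ht; omega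
        simp only [Function.comp_apply]
        rw [pv_cell_agree tl rows n k (n - 1 - k - 1 - (t:Int)) hlen (by omega) (by omega) (by omega) (by omega)]
        exact congrArg (fun z => PySem.List.pyGetD (pvPad tl rows n) z 'X') (by ring)
      rw [pvSpiralA, dif_pos (show k ≤ n - 1 - k ∧ k ≤ rows - 1 - k by omega),
          if_neg Bool.false_ne_true]
      dsimp only
      rw [hseg1, hseg2, hseg3, hseg4]
      by_cases h2 : 1 ≤ rows - 2 * k - 2 ∧ 0 ≤ n - 1 - 2 * k - 2
      · rw [Int.toNat_of_nonneg (show (0:Int) ≤ n - 1 - 2 * k - 1 by omega)]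
        rw [show k - 1 + 1 * (rows - 2 * k) + 0 * (n - 1 - 2 * k) + -1 * (rows - 2 * k - 1) + 0 * (n - 1 - 2 * k - 1) = k + 1 - 1 from by ring,
            show k + 0 * (rows - 2 * k) + 1 * (n - 1 - 2 * k) + 0 * (rows - 2 * k - 1) + -1 * (n - 1 - 2 * k - 1) = k + 1 from by ring,
            show rows - 2 * k - 2 = rows - 2 * (k + 1) from by ring,
            show n - 1 - 2 * k - 2 = n - 1 - 2 * (k + 1) from by ring,
            ih (k + 1) _ (by omega) (by omega),
            show n - 1 - (k + 1) = n - 1 - k - 1 from by ring,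
            show rows - 1 - (k + 1) = rows - 1 - k - 1 from by ring]
        simp [List.append_assoc]
      · rw [pvTurtle, dif_neg (by omega)]
        rw [show pvSpiralA (pvMatrixA tl rows n) false (k + 1) (n - 1 - k - 1) (k + 1) (rows - 1 - k - 1) = [] from by
              rw [pvSpiralA, dif_neg (by omega)]]
        simp [List.append_assoc]
    · rw [pvTurtle, dif_neg (by omega), pvSpiralA, dif_neg (by omega)]
      simp

-- ===== VERDICT (by name: the statement is the Claim_ definition above) =====
theorem route_cipher_spec : Claim_equal_route_cipher := by
  intro text n cw _ hpre
  unfold Spec_route_cipher route_cipher route_cipher_alt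
  simp only [PySem.List.len_eq]
  set tl := text.toList with htl
  rw [show pvCeilB (tl.length : Int) n = pvCeil (tl.length : Int) n from rfl]
  set rows := pvCeil (tl.length : Int) n with hrows
  rcases lt_or_gt_of_ne hpre with hneg | hpos
  · -- n < 0: rows ≤ 0, neither loop runs
    have hdm := PySem.Int.floordiv_mul_add_mod (-(tl.length : Int)) n
    have hmb := PySem.Int.mod_neg_bounds (-(tl.length : Int)) hneg
    have hrle : rows ≤ 0 := by
      rw [hrows]; unfold pvCeil; nlinarith [hmb.1, hmb.2, Int.natCast_nonneg tl.length]
    cases cw with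
    | true =>
      rw [if_pos rfl, pvTurtle, dif_neg (by omega), pvSpiralA, dif_neg (by omega)]
    | false =>
      rw [if_neg Bool.false_ne_true, pvTurtle, dif_neg (by omega), pvSpiralA, dif_neg (by omega)]
  · -- n > 0: len ≤ rows * n, then the turtle/spiral lemma at k = 0
    have hdm := PySem.Int.floordiv_mul_add_mod (-(tl.length : Int)) n
    have hm0 := PySem.Int.mod_nonneg (-(tl.length : Int)) hpos
    have hmlt := PySem.Int.mod_lt (-(tl.length : Int)) hpos
    have hrowsval : rows * n = (tl.length : Int) + PySem.Int.mod (-(tl.length : Int)) n := by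
      rw [hrows]; unfold pvCeil; linarith [hdm]
    have hlen : (tl.length : Int) ≤ rows * n := by omega
    cases cw with
    | true =>
      have h0 := pv_turtle_cw tl rows n hlen (n - 0).toNat 0 [] le_rfl (by omega)
      simp only [mul_zero, sub_zero, zero_sub] at h0
      rw [if_pos rfl, h0, List.nil_append]
    | false =>
      have h0 := pv_turtle_ccw tl rows n hlen (rows - 0).toNat 0 [] le_rfl (by omega)
      simp only [mul_zero, sub_zero, zero_sub] at h0
      rw [if_neg Bool.false_ne_true, h0, List.nil_append]
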